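-- pv_equiv track=rewrite | github.com/chris00234/leet | Find_Subsequence_of_Length_K_With_the_Largest_Sum/main.py | maxSubsequence
-- ===== SOURCE A (Python) =====
-- from typing import List
--
-- def maxSubsequence(nums: List[int], k: int) -> List[int]:
--     numCopy = nums.copy()
--     nums.sort()
--     tmp = []
--     ret = []
--     for i in range(len(nums) - 1, len(nums) - 1 - k, -1):
--         tmp.append(nums[i])
--
--     for num in numCopy:
--         if num in tmp:
--             ret.append(num)
--             idx = tmp.index(num)
--             tmp.pop(idx)
--     return ret
-- ===== SOURCE B (Python) =====
-- from typing import List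
--
-- def maxSubsequence(nums: List[int], k: int) -> List[int]:
--     n = len(nums)
--     kk = min(k, n)
--     if kk <= 0:
--         return []
--     if kk >= n:
--         return list(nums)
--     thresh = sorted(nums, reverse=True)[kk - 1]
--     quota = kk - sum(1 for x in nums if x > thresh)
--     out = []
--     for x in nums:
--         if x > thresh:
--             out.append(x)
--         elif x == thresh and quota > 0:
--             out.append(x)
--             quota -= 1
--     return out
-- ===== Notes on version B (the rewrite author's own statement) =====
-- stated objective: faster
-- what changed: B replaces A's build-top-k-list-then-repeated-membership/index/pop inner scans by a sort-once threshold: it reads the k-th largest value from one sort, counts how many elements strictly exceed it, and emits the answer in a single counted pass over the original order.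
-- crash fix: A raises IndexError when k > 2*len(nums) (its reverse index walk runs past -len on the sorted copy); B returns the whole list (or [] when nums is empty) there. — e.g. on maxSubsequence([1, 2], 5): A raises IndexError, B returns [1, 2]
import Mathlib
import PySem

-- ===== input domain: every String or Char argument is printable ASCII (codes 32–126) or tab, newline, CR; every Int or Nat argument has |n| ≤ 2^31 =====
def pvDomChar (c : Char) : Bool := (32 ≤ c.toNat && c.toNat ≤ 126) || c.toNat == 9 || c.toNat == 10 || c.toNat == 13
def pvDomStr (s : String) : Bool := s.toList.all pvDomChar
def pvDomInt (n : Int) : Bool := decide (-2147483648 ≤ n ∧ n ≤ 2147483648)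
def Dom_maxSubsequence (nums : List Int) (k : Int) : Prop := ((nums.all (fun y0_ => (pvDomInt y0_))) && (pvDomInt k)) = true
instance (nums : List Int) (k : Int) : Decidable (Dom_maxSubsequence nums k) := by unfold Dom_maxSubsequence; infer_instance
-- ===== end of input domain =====

-- B computes the k-th largest value from one sort and emits the answer in a single counted
-- pass in original order, instead of A's top-k list with repeated membership/index/pop scans.
-- Python A sorts its argument list in place; the equivalence here is about the RETURN value only.

-- ===== PORT A =====
def maxSubsequence (nums : List Int) (k : Int) : List Int :=
  let numCopy := nums
  let sortedNums := PySem.List.sorted nums (fun x => x) false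
  let n : Int := sortedNums.length
  -- for i in range(len(nums)-1, len(nums)-1-k, -1): tmp.append(nums[i])
  -- (Python raises IndexError where pyGetD's index is out of range; Pre_ excludes that)
  let tmp := (PySem.List.pyRange (n - 1) (n - 1 - k) (-1)).foldl
      (fun acc i => acc ++ [PySem.List.pyGetD sortedNums i 0]) []
  (numCopy.foldl
    (fun (st : List Int × List Int) num =>
      if num ∈ st.1 then
        match PySem.List.index? st.1 num with
        | some idx =>
          match PySem.List.pop? st.1 (idx : Int) with
          | some (_, tmp') => (tmp', st.2 ++ [num])
          | none => (st.1, st.2 ++ [num])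
        | none => (st.1, st.2 ++ [num])
      else st)
    (tmp, [])).2

-- ===== PORT B =====
def maxSubsequence_alt (nums : List Int) (k : Int) : List Int :=
  let n : Int := nums.length
  let kk := min k n
  if kk ≤ 0 then []
  else if n ≤ kk then nums
  else
    let thresh := PySem.List.pyGetD (PySem.List.sorted nums (fun x => x) true) (kk - 1) 0
    let quota := kk - (nums.countP (fun x => decide (thresh < x)) : Int)
    (nums.foldl
      (fun (st : List Int × Int) x =>
        if thresh < x then (st.1 ++ [x], st.2)
        else if x = thresh ∧ 0 < st.2 then (st.1 ++ [x], st.2 - 1)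
        else st)
      ([], quota)).1

-- ===== PRECONDITION & SPEC =====
-- Pre_ excludes exactly the inputs where A raises IndexError: k > 2*len(nums).
def Pre_maxSubsequence (nums : List Int) (k : Int) : Prop := k ≤ 2 * (nums.length : Int)
instance (nums : List Int) (k : Int) : Decidable (Pre_maxSubsequence nums k) := by
  unfold Pre_maxSubsequence; infer_instance

def pvWitness_maxSubsequence : List Int × Int := ([3, 1, 2], 2)

-- A raises IndexError when k > 2*len(nums) (its reverse index walk runs past -len); B returns the whole list there.
def Raises_maxSubsequence (nums : List Int) (k : Int) : Prop := 2 * (nums.length : Int) < k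
instance (nums : List Int) (k : Int) : Decidable (Raises_maxSubsequence nums k) := by
  unfold Raises_maxSubsequence; infer_instance
def pvRaiseWitness_maxSubsequence : List Int × Int := ([1, 2], 5)
def pvRaiseWitnessOut_maxSubsequence : List Int := [1, 2]

def Spec_maxSubsequence (nums : List Int) (k : Int) (out : List Int) : Prop := out = maxSubsequence_alt nums k
instance (nums : List Int) (k : Int) (out : List Int) : Decidable (Spec_maxSubsequence nums k out) := by unfold Spec_maxSubsequence; infer_instance

-- ===== CLAIM (what is proved, stated in full; the proofs are below) =====
def Claim_equal_maxSubsequence : Prop := ∀ (nums : List Int) (k : Int), Dom_maxSubsequence nums k → Pre_maxSubsequence nums k → Spec_maxSubsequence nums k (maxSubsequence nums k)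

def Claim_raises_maxSubsequence : Prop := (∀ (nums : List Int) (k : Int), Dom_maxSubsequence nums k → Raises_maxSubsequence nums k → ¬ Pre_maxSubsequence nums k) ∧ (Dom_maxSubsequence (pvRaiseWitness_maxSubsequence.1) (pvRaiseWitness_maxSubsequence.2) ∧ Raises_maxSubsequence (pvRaiseWitness_maxSubsequence.1) (pvRaiseWitness_maxSubsequence.2) ∧ maxSubsequence_alt (pvRaiseWitness_maxSubsequence.1) (pvRaiseWitness_maxSubsequence.2) = pvRaiseWitnessOut_maxSubsequence)

-- ===== LEMMAS AND PROOFS =====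


def goCF (c : Int → Nat) : List Int → List Int
  | [] => []
  | x :: l => if 0 < c x then x :: goCF (fun v => if v = x then c x - 1 else c v) l
              else goCF c l

theorem eraseIdx_append_cons (pre suf : List Int) (x : Int) :
    (pre ++ x :: suf).eraseIdx pre.length = pre ++ suf := by
  induction pre with
  | nil => simp
  | cons a p ih => simpa [List.eraseIdx] using ih

theorem A_foldl (l tmp ret : List Int) :
    (l.foldl
      (fun (st : List Int × List Int) num =>
        if num ∈ st.1 then
          match PySem.List.index? st.1 num with
          | some idx =>
            match PySem.List.pop? st.1 (idx : Int) with
            | some (_, tmp') => (tmp', st.2 ++ [num])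
            | none => (st.1, st.2 ++ [num])
          | none => (st.1, st.2 ++ [num])
        else st)
      (tmp, ret)).2 = ret ++ goCF (fun v => tmp.count v) l := by
  induction l generalizing tmp ret with
  | nil => simp [goCF]
  | cons x l ih =>
    by_cases hx : x ∈ tmp
    · obtain ⟨kk, hk⟩ := Option.isSome_iff_exists.mp ((PySem.List.index?_isSome_iff tmp x).2 hx)
      obtain ⟨pre, suf, htmp, hlen, hpre⟩ := (PySem.List.index?_eq_some_iff tmp x kk).1 hk
      have hklt : kk < tmp.length := by subst htmp; simp; omega
      have herase : tmp.eraseIdx kk = pre ++ suf := by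
        subst htmp hlen; exact eraseIdx_append_cons pre suf x
      simp only [List.foldl_cons, if_pos hx, hk, PySem.List.pop?_natCast tmp kk hklt]
      rw [ih]
      have hc : 0 < tmp.count x := List.count_pos_iff.2 hx
      rw [goCF, if_pos hc]
      have hfun : (fun v => if v = x then tmp.count x - 1 else tmp.count v)
          = fun v => (tmp.eraseIdx kk).count v := by
        funext v
        rw [herase]
        subst htmp
        by_cases hv : v = x
        · subst hv
          have : pre.count v = 0 := List.count_eq_zero.2 hpre
          simp [List.count_append, this]
        · simp [List.count_append, List.count_cons, hv, Ne.symm hv]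
      rw [hfun]
      simp
    · simp only [List.foldl_cons, if_neg hx]
      rw [ih]
      have hc : tmp.count x = 0 := List.count_eq_zero.2 hx
      rw [goCF, if_neg (by omega)]

theorem B_foldl (t : Int) (l out : List Int) (q : Int) (hq : 0 ≤ q) :
    (l.foldl
      (fun (st : List Int × Int) x =>
        if t < x then (st.1 ++ [x], st.2)
        else if x = t ∧ 0 < st.2 then (st.1 ++ [x], st.2 - 1)
        else st)
      (out, q)).1
    = out ++ goCF (fun v => if t < v then l.count v else if v = t then q.toNat else 0) l := by
  induction l generalizing out q with
  | nil => simp [goCF]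
  | cons x l ih =>
    simp only [List.foldl_cons]
    by_cases h1 : t < x
    · rw [if_pos h1, ih (out ++ [x]) q hq, goCF]
      rw [if_pos (by simp only [if_pos h1, List.count_cons_self]; omega)]
      have hfun : (fun v => if v = x then (if t < x then (x :: l).count x
              else if x = t then q.toNat else 0) - 1
            else if t < v then (x :: l).count v else if v = t then q.toNat else 0)
          = fun v => if t < v then l.count v else if v = t then q.toNat else 0 := by
        funext v
        by_cases hv : v = x
        · subst hv; simp [if_pos h1, List.count_cons_self]
        · have hxv : ¬ x = v := fun h => hv h.symm
          simp [if_neg hv, List.count_cons, hxv]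
      rw [hfun]
      simp
    · by_cases h2 : x = t ∧ 0 < q
      · obtain ⟨hxt, hq0⟩ := h2
        rw [if_neg h1, if_pos ⟨hxt, hq0⟩, ih (out ++ [x]) (q - 1) (by omega), goCF]
        rw [if_pos (by subst hxt; simp [if_neg h1]; omega)]
        have hfun : (fun v => if v = x then (if t < x then (x :: l).count x
                else if x = t then q.toNat else 0) - 1
              else if t < v then (x :: l).count v else if v = t then q.toNat else 0)
            = fun v => if t < v then l.count v else if v = t then (q - 1).toNat else 0 := by
          funext v
          by_cases hv : v = x
          · subst hv
            rw [if_pos rfl, if_neg h1, if_neg h1, if_pos hxt, if_pos hxt]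
            omega
          · simp only [if_neg hv]
            by_cases htv : t < v
            · have hxv : ¬ x = v := by omega
              simp [if_pos htv, List.count_cons, hxv]
            · have hvt : ¬ v = t := fun h => hv (h.trans hxt.symm)
              simp [if_neg htv, hvt]
        rw [hfun]
        simp
      · rw [if_neg h1, if_neg h2, ih out q hq, goCF]
        by_cases hxt : x = t
        · have hq0 : q = 0 := by
            rcases (not_and_or.mp h2) with h | h
            · exact absurd hxt h
            · omega
          rw [if_neg (by subst hxt; subst hq0; simp [if_neg h1])]
          congr 1
          apply congrArg (goCF · l)
          funext v
          by_cases htv : t < v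
          · simp [if_pos htv, List.count_cons, (by subst hxt; omega : x ≠ v)]
          · simp [if_neg htv]
        · have hxlt : x < t := by omega
          rw [if_neg (by simp [if_neg h1, hxt])]
          congr 1
          apply congrArg (goCF · l)
          funext v
          by_cases htv : t < v
          · simp [if_pos htv, List.count_cons, (ne_of_lt (lt_trans hxlt htv))]
          · simp [if_neg htv]

theorem goCF_all (c : Int → Nat) (l : List Int) (h : ∀ v, l.count v ≤ c v) :
    goCF c l = l := by
  induction l generalizing c with
  | nil => rfl
  | cons x l ih =>
    have hx : 0 < c x := lt_of_lt_of_le (by simp) (h x)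
    rw [goCF, if_pos hx]
    congr 1
    apply ih
    intro v
    by_cases hv : v = x
    · subst hv
      have := h v
      simp [List.count_cons_self] at this
      simp
      omega
    · have := h v
      simp [List.count_cons, hv] at this ⊢
      omega



theorem take_ge (r : List Int) (hp : List.Pairwise (fun a b : Int => b ≤ a) r) (m : Nat)
    (hm0 : 0 < m) (hmn : m ≤ r.length) {v : Int} (hv : v ∈ r.take m) :
    r[m-1]'(by omega) ≤ v := by
  obtain ⟨i, hi, hiv⟩ := List.mem_iff_getElem.1 hv
  rw [List.getElem_take] at hiv
  subst hiv
  have hi' : i < m := lt_of_lt_of_le hi (List.length_take_le m r)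
  rcases Nat.lt_or_ge i (m-1) with h | h
  · exact List.pairwise_iff_getElem.1 hp i (m-1) (by omega) (by omega) h
  · have : i = m - 1 := by omega
    subst this
    exact le_refl _
theorem drop_le (r : List Int) (hp : List.Pairwise (fun a b : Int => b ≤ a) r) (m : Nat)
    (hm0 : 0 < m) (hmn : m ≤ r.length) {v : Int} (hv : v ∈ r.drop m) :
    v ≤ r[m-1]'(by omega) := by
  obtain ⟨i, hi, hiv⟩ := List.mem_iff_getElem.1 hv
  have hi' : m + i < r.length := by have := List.length_drop (l := r) (i := m); omega
  rw [List.getElem_drop] at hiv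
  subst hiv
  exact List.pairwise_iff_getElem.1 hp (m-1) (m+i) (by omega) hi' (by omega)


theorem cnt_gt (r : List Int) (m : Nat) (t v : Int)
    (hK2 : ∀ w ∈ r.drop m, w ≤ t) (hv : t < v) :
    (r.take m).count v = r.count v := by
  conv_rhs => rw [← List.take_append_drop m r]
  rw [List.count_append]
  have : (r.drop m).count v = 0 := List.count_eq_zero.2 (fun hmem =>
    absurd (hK2 v hmem) (by omega))
  omega

theorem cnt_lt (r : List Int) (m : Nat) (t v : Int)
    (hK1 : ∀ w ∈ r.take m, t ≤ w) (hv : v < t) :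
    (r.take m).count v = 0 := List.count_eq_zero.2 (fun hmem =>
    absurd (hK1 v hmem) (by omega))

theorem cntP_drop (r : List Int) (m : Nat) (t : Int)
    (hK2 : ∀ w ∈ r.drop m, w ≤ t) :
    r.countP (fun x => decide (t < x)) = (r.take m).countP (fun x => decide (t < x)) := by
  conv_lhs => rw [← List.take_append_drop m r]
  rw [List.countP_append]
  have : (r.drop m).countP (fun x => decide (t < x)) = 0 := by
    rw [List.countP_eq_zero]
    intro a ha
    have := hK2 a ha
    simpa using this
  omega

theorem cnt_eq (r : List Int) (m : Nat) (t : Int) (hmn : m ≤ r.length)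
    (hK1 : ∀ w ∈ r.take m, t ≤ w) (hK2 : ∀ w ∈ r.drop m, w ≤ t) :
    (r.take m).count t = m - r.countP (fun x => decide (t < x)) := by
  rw [cntP_drop r m t hK2]
  have hlen : (r.take m).length = m := by simp [hmn]
  have hsplit := List.length_eq_countP_add_countP (fun x => decide (t < x)) (l := r.take m)
  rw [hlen] at hsplit
  have hcnt : (r.take m).countP (fun a => decide ¬(decide (t < a)) = true)
      = (r.take m).count t := by
    rw [List.count_eq_countP]
    apply List.countP_congr
    intro x hx
    have hge := hK1 x hx
    simp only [decide_eq_true_eq, beq_iff_eq]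
    constructor
    · intro h; omega
    · intro h; omega
  omega

theorem cntP_le (r : List Int) (m : Nat) (t : Int) (hmn : m ≤ r.length)
    (hK2 : ∀ w ∈ r.drop m, w ≤ t) :
    r.countP (fun x => decide (t < x)) ≤ m := by
  rw [cntP_drop r m t hK2]
  exact le_trans List.countP_le_length (by simp [hmn])

theorem sorted_rev_eq (xs : List Int) :
    PySem.List.sorted xs (fun x => x) true = (PySem.List.sorted xs (fun x => x) false).reverse := by
  apply List.Perm.eq_of_pairwise (le := fun a b : Int => b ≤ a)
  · intro a b _ _ h1 h2; omega
  · exact PySem.List.sorted_pairwise_rev xs (fun x => x)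
  · rw [List.pairwise_reverse]
    exact PySem.List.sorted_pairwise xs (fun x => x)
  · exact (PySem.List.sorted_perm xs _ true).trans
      (((List.reverse_perm _).trans (PySem.List.sorted_perm xs _ false)).symm)

theorem tmp_take (s : List Int) (k : Int) (hk0 : 0 < k) (hkn : k ≤ (s.length : Int)) :
    (PySem.List.pyRange ((s.length : Int) - 1) ((s.length : Int) - 1 - k) (-1)).map
      (fun i => PySem.List.pyGetD s i 0) = s.reverse.take k.toNat := by
  rw [PySem.List.pyRange_neg_one, List.map_map]
  have harg : ((s.length : Int) - 1 - ((s.length : Int) - 1 - k)).toNat = k.toNat := by omega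
  rw [harg]
  apply List.ext_getElem
  · simp; omega
  · intro i h1 h2
    simp only [List.getElem_map, List.getElem_range, Function.comp_apply]
    have hi : i < k.toNat := by simpa using h1
    have hlen : i < s.length := by omega
    rw [List.getElem_take, List.getElem_reverse]
    rw [PySem.List.pyGetD_eq_getElem s 0 (by omega) (by omega)]
    congr 1
    omega

theorem tmp_ge (s : List Int) (k : Int) (hkn : (s.length : Int) ≤ k) (v : Int) :
    s.count v ≤ ((PySem.List.pyRange ((s.length : Int) - 1) ((s.length : Int) - 1 - k) (-1)).map
      (fun i => PySem.List.pyGetD s i 0)).count v := by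
  rw [PySem.List.pyRange_neg_one_eq_reverse]
  have h1 : (s.length : Int) - 1 - k + 1 = (s.length : Int) - k := by ring
  have h2 : (s.length : Int) - 1 + 1 = (s.length : Int) := by ring
  rw [h1, h2]
  rw [PySem.List.pyRange_one_append ((s.length : Int) - k) 0 (s.length : Int) (by omega) (by omega)]
  rw [List.reverse_append, List.map_append, List.count_append]
  have h3 : (List.map (fun i => PySem.List.pyGetD s i 0) (PySem.List.pyRange 0 (s.length : Int)).reverse).count v
      = s.count v := by
    rw [List.map_reverse, List.count_reverse]
    rw [PySem.List.map_pyGetD_pyRange_zero' s 0]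
  omega


theorem goCF_of_zero (c : Int → Nat) (l : List Int) (h : ∀ v, c v = 0) : goCF c l = [] := by
  induction l with
  | nil => rfl
  | cons x l ih => rw [goCF, if_neg (by rw [h x]; omega)]; exact ih

-- ===== VERDICT (by name: the statement is the Claim_ definition above) =====
theorem maxSubsequence_spec : Claim_equal_maxSubsequence := by
  intro nums k _hdom hpre
  unfold Pre_maxSubsequence at hpre
  unfold Spec_maxSubsequence
  unfold maxSubsequence maxSubsequence_alt
  simp only [PySem.List.length_sorted, PySem.List.foldl_append_singleton_eq_map, List.nil_append]
  rw [A_foldl]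
  rw [List.nil_append]
  set s := PySem.List.sorted nums (fun x => x) false with hs
  have hsl : s.length = nums.length := PySem.List.length_sorted nums _ false
  have hperm : s.Perm nums := PySem.List.sorted_perm nums _ false
  have hrperm : s.reverse.Perm nums := (List.reverse_perm s).trans hperm
  have hp : List.Pairwise (fun a b : Int => b ≤ a) s.reverse := by
    rw [List.pairwise_reverse]
    exact PySem.List.sorted_pairwise nums (fun x => x)
  by_cases hk0 : min k (nums.length : Int) ≤ 0
  · -- k ≤ 0 (or nums = []): both sides empty
    rw [if_pos hk0]
    rcases List.eq_nil_or_concat nums with hnil | _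
    · subst hnil; rfl
    · have hk : k ≤ 0 := by
        rcases le_or_gt k 0 with h | h
        · exact h
        · exfalso
          have hn0 : (nums.length : Int) ≤ 0 := by omega
          have : nums.length = 0 := by omega
          simp_all
      rw [PySem.List.pyRange_neg_one_eq_nil (by omega)]
      exact goCF_of_zero _ nums (fun v => rfl)
  · rw [if_neg hk0]
    by_cases hkn : (nums.length : Int) ≤ min k (nums.length : Int)
    · -- k ≥ n: A keeps everything
      rw [if_pos hkn]
      have hnk : (nums.length : Int) ≤ k := by omega
      apply goCF_all
      intro v
      calc nums.count v = s.count v := (hperm.count_eq v).symm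
        _ ≤ _ := by
            have h := tmp_ge s k (by rw [hsl]; exact hnk) v
            rw [hsl] at h
            exact h
    · -- main case: 0 < k < n
      rw [if_neg hkn]
      have hkk : min k (nums.length : Int) = k := by omega
      rw [hkk] at *
      have hk0' : 0 < k := by omega
      have hkn' : k < (nums.length : Int) := by omega
      set m : Nat := k.toNat with hm
      have hm0 : 0 < m := by omega
      have hmn : m ≤ s.reverse.length := by simp [hsl]; omega
      -- tmp is the top-k slice of the descending sort
      have htmp := tmp_take s k hk0' (by rw [hsl]; omega)
      rw [hsl] at htmp
      rw [htmp]
      -- the threshold of B is the last kept element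
      set t : Int := s.reverse[m-1]'(by omega) with ht
      have hthresh : PySem.List.pyGetD (PySem.List.sorted nums (fun x => x) true) (k - 1) 0 = t := by
        rw [sorted_rev_eq, ← hs]
        rw [PySem.List.pyGetD_eq_getElem _ 0 (by omega) (by simp [hsl]; omega)]
        congr 1
        omega
      rw [hthresh]
      have hK1 : ∀ w ∈ s.reverse.take m, t ≤ w := fun w hw => take_ge s.reverse hp m hm0 hmn hw
      have hK2 : ∀ w ∈ s.reverse.drop m, w ≤ t := fun w hw => drop_le s.reverse hp m hm0 hmn hw
      have hcountP : nums.countP (fun x => decide (t < x)) = s.reverse.countP (fun x => decide (t < x)) :=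
        (hrperm.countP_eq _).symm
      have hPle : s.reverse.countP (fun x => decide (t < x)) ≤ m := cntP_le s.reverse m t hmn hK2
      rw [B_foldl t nums [] _ (by rw [hcountP]; omega)]
      rw [List.nil_append]
      apply congrArg (goCF · nums)
      funext v
      rcases lt_trichotomy t v with hv | hv | hv
      · rw [if_pos hv, cnt_gt s.reverse m t v hK2 hv]
        exact hrperm.count_eq v
      · rw [if_neg (by omega), if_pos hv.symm, ← hv]
        rw [cnt_eq s.reverse m t hmn hK1 hK2, hcountP]
        omega
      · rw [if_neg (by omega), if_neg (by omega)]
        exact cnt_lt s.reverse m t v hK1 hv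

@[simp] theorem maxSubsequence_raises : Claim_raises_maxSubsequence := by
  unfold Claim_raises_maxSubsequence
  refine ⟨?_, by decide⟩
  intro nums k _ hr hp
  exact absurd hp (by unfold Pre_maxSubsequence Raises_maxSubsequence at *; omega)
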